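-- pv_equiv track=rewrite | github.com/kriskrisk/rec_tasks | task3.py | group_mappings
-- ===== SOURCE A (Python) =====
-- from itertools import groupby
--
-- def group_mappings(list_of_mappings):
--     grouped_mappings = []
--
--     for key, group in groupby(list_of_mappings, lambda x: x[0]):
--         new_values = []
--
--         for mapping in group:
--             new_values.append(mapping[1])
--
--         grouped_mappings.append((key, new_values))
--
--     return grouped_mappings
-- ===== SOURCE B (Python) =====
-- def group_mappings(list_of_mappings):
--     n = len(list_of_mappings)
--     starts = [i for i in range(n)
--               if i == 0 or list_of_mappings[i][0] != list_of_mappings[i - 1][0]]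
--     bounds = starts + [n]
--     return [(list_of_mappings[s][0], [p[1] for p in list_of_mappings[s:e]])
--             for s, e in zip(bounds, bounds[1:])]
-- ===== Notes on version B (the rewrite author's own statement) =====
-- stated objective: alternative
-- what changed: Replaces the streaming itertools.groupby consumption by a two-stage index computation: first collect all run-start indices in one comprehension, then build each group by slicing the list between consecutive boundary indices.
import Mathlib
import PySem

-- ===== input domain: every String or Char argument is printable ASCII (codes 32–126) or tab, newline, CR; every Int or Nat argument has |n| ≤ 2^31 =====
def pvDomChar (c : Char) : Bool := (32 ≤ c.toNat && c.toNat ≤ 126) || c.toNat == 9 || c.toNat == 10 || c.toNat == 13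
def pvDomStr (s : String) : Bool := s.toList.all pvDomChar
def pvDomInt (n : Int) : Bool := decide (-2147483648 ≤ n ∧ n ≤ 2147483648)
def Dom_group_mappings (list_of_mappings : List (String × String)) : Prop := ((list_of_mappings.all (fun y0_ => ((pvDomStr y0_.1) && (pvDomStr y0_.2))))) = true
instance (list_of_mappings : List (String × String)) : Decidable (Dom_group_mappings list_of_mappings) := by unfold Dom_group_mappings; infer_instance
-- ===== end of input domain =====

-- B replaces the streaming groupby by a two-stage computation: collect all run-start
-- indices first, then build each group by slicing between consecutive boundaries
-- (objective: alternative; same O(n) cost).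


-- ===== PORT A =====
-- Port of A: itertools.groupby keyed by x[0] yields maximal consecutive runs of equal
-- first components, and the inner for-loop consumes each run collecting the second
-- components.  groupby is not in PySem; its consecutive-run semantics is rendered by
-- hand (exact: the key function x[0] never raises on pairs).
def group_mappings : List (String × String) → List (String × List String)
  | [] => []
  | (k, v) :: rest =>
      (k, v :: (rest.takeWhile (fun p => p.1 == k)).map Prod.snd)
        :: group_mappings (rest.dropWhile (fun p => p.1 == k))
termination_by l => l.length
decreasing_by
  simp only [List.length_cons]
  exact Nat.lt_succ_of_le (List.length_dropWhile_le _ _)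

-- ===== PORT B =====
-- lst[i] for the in-range indices B produces; the default is never reached (every
-- index below is drawn from range(n) resp. is n used only as a slice bound).
def gmGet (xs : List (String × String)) (i : Int) : String × String :=
  PySem.List.pyGetD xs i ("", "")

-- starts = [i for i in range(n) if i == 0 or lst[i][0] != lst[i-1][0]]
def gmStarts (xs : List (String × String)) : List Int :=
  (PySem.List.pyRange 0 xs.length 1).filter
    (fun i => i == 0 || !((gmGet xs i).1 == (gmGet xs (i - 1)).1))

-- bounds = starts + [n]; one group per consecutive pair of bounds, sliced out.
def group_mappings_alt (list_of_mappings : List (String × String)) : List (String × List String) :=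
  let bounds := gmStarts list_of_mappings ++ [(list_of_mappings.length : Int)]
  (bounds.zip bounds.tail).map (fun se =>
    ((gmGet list_of_mappings se.1).1,
     (PySem.List.slice list_of_mappings (some se.1) (some se.2)).map Prod.snd))

-- ===== PRECONDITION & SPEC =====
def Spec_group_mappings (list_of_mappings : List (String × String)) (out : List (String × List String)) : Prop := out = group_mappings_alt list_of_mappings
instance (list_of_mappings : List (String × String)) (out : List (String × List String)) : Decidable (Spec_group_mappings list_of_mappings out) := by unfold Spec_group_mappings; infer_instance

-- ===== CLAIM (what is proved, stated in full; the proofs are below) =====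
def Claim_equal_group_mappings : Prop := ∀ (list_of_mappings : List (String × String)), Dom_group_mappings list_of_mappings → Spec_group_mappings list_of_mappings (group_mappings list_of_mappings)

-- ===== LEMMAS AND PROOFS =====

-- Nat-level restatement of B (proof-only helpers).
def natP (xs : List (String × String)) (k : Nat) : Bool :=
  k == 0 || !((xs.getD k ("", "")).1 == (xs.getD (k - 1) ("", "")).1)

def natStarts (xs : List (String × String)) : List Nat :=
  (List.range xs.length).filter (natP xs)

def natBounds (xs : List (String × String)) : List Nat :=
  natStarts xs ++ [xs.length]

def natGroup (xs : List (String × String)) (se : Nat × Nat) : String × List String :=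
  ((xs.getD se.1 ("", "")).1, ((xs.drop se.1).take (se.2 - se.1)).map Prod.snd)

def altN (xs : List (String × String)) : List (String × List String) :=
  ((natBounds xs).zip (natBounds xs).tail).map (natGroup xs)

theorem alt_eq_altN (xs : List (String × String)) :
    group_mappings_alt xs = altN xs := by
  have hs : gmStarts xs = (natStarts xs).map (fun k : Nat => (k : Int)) := by
    unfold gmStarts natStarts
    rw [PySem.List.pyRange_one]
    simp only [Int.sub_zero, Int.toNat_natCast, zero_add]
    rw [List.filter_map]
    congr 1
    apply List.filter_congr
    intro k _
    cases k with
    | zero => simp [natP]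
    | succ j =>
        have h3 : (((j + 1 : Nat)) : Int) - 1 = ((j : Nat) : Int) := by push_cast; ring
        simp only [Function.comp, natP, gmGet, h3,
          PySem.List.pyGetD_natCast, Nat.add_sub_cancel]
        simp
        intro h
        omega
  have hdef : group_mappings_alt xs
      = ((gmStarts xs ++ [(xs.length : Int)]).zip (gmStarts xs ++ [(xs.length : Int)]).tail).map
          (fun se => ((gmGet xs se.1).1,
            (PySem.List.slice xs (some se.1) (some se.2)).map Prod.snd)) := rfl
  rw [hdef, hs]
  have hb : (natStarts xs).map (fun k : Nat => (k : Int)) ++ [(xs.length : Int)]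
      = (natStarts xs ++ [xs.length]).map (fun k : Nat => (k : Int)) := by
    simp
  rw [hb, ← List.map_tail, List.zip_map, List.map_map]
  unfold altN natBounds
  apply List.map_congr_left
  intro se _
  obtain ⟨s, e⟩ := se
  simp only [Function.comp, Prod.map, natGroup, gmGet,
    PySem.List.pyGetD_natCast, PySem.List.slice_natCast]

-- every index < (p :: w).length has key p.1, given all of w keyed p.1
theorem key_of_lt (p : String × String) (w rest : List (String × String))
    (hw : ∀ q ∈ w, q.1 = p.1) {k : Nat} (hk : k < w.length + 1) :
    ((((p :: w) ++ rest).getD k ("", "")).1) = p.1 := by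
  have hlen : k < (p :: w).length := by simpa using hk
  rw [List.getD_append _ _ _ _ hlen, List.getD_eq_getElem _ _ hlen]
  have hm : (p :: w)[k] ∈ p :: w := List.getElem_mem _
  rcases List.mem_cons.mp hm with h | h
  · rw [h]
  · exact hw _ h

theorem natStarts_decomp (p : String × String) (w rest : List (String × String))
    (hw : ∀ q ∈ w, q.1 = p.1)
    (hr : ∀ q, rest.head? = some q → (q.1 = p.1) → False) :
    natStarts ((p :: w) ++ rest)
      = 0 :: (natStarts rest).map (fun j => w.length + 1 + j) := by
  unfold natStarts
  rw [show ((p :: w) ++ rest).length = (w.length + 1) + rest.length by simp; omega]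
  rw [List.range_add, List.filter_append]
  have h1 : (List.range (w.length + 1)).filter (natP ((p :: w) ++ rest)) = [0] := by
    rw [List.range_succ_eq_map, List.filter_cons]
    have h0 : natP ((p :: w) ++ rest) 0 = true := by simp [natP]
    rw [if_pos h0]
    have : (((List.range w.length).map Nat.succ).filter (natP ((p :: w) ++ rest))) = [] := by
      rw [List.filter_eq_nil_iff]
      intro a ha
      obtain ⟨k, hk, rfl⟩ := List.mem_map.mp ha
      have hk' : k < w.length := List.mem_range.mp hk
      have e1 : ((((p :: w) ++ rest).getD (Nat.succ k) ("", "")).1) = p.1 :=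
        key_of_lt p w rest hw (by omega)
      have e2 : ((((p :: w) ++ rest).getD (Nat.succ k - 1) ("", "")).1) = p.1 :=
        key_of_lt p w rest hw (by omega)
      simp only [natP]
      rw [e1, e2]
      simp
    rw [this]
  rw [h1]
  have h2 : (List.range rest.length).filter (natP ((p :: w) ++ rest) ∘ (w.length + 1 + ·))
      = (List.range rest.length).filter (natP rest) := by
    apply List.filter_congr
    intro j hj
    have hj' : j < rest.length := List.mem_range.mp hj
    simp only [Function.comp]
    cases j with
    | zero =>
        cases rest with
        | nil => simp at hj'
        | cons r rs =>
            have e1 : (((p :: w) ++ r :: rs).getD (w.length + 1 + 0) ("", "")) = r := by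
              rw [show w.length + 1 + 0 = (p :: w).length + 0 by simp]
              rw [List.getD_append_right _ _ _ _ (by simp)]
              simp
            have e2 : ((((p :: w) ++ r :: rs).getD (w.length + 1 + 0 - 1) ("", "")).1) = p.1 :=
              key_of_lt p w (r :: rs) hw (by omega)
            have hne : ¬ (r.1 = p.1) := fun h => hr r rfl h
            simp only [natP]
            rw [e1, e2]
            simp [hne]
    | succ k =>
        have e1 : ((p :: w) ++ rest).getD (w.length + 1 + (k + 1)) ("", "")
            = rest.getD (k + 1) ("", "") := by
          rw [List.getD_append_right _ _ _ _ (by simp only [List.length_cons]; omega)]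
          congr 1
          simp only [List.length_cons]; omega
        have e2 : ((p :: w) ++ rest).getD (w.length + 1 + (k + 1) - 1) ("", "")
            = rest.getD k ("", "") := by
          rw [List.getD_append_right _ _ _ _ (by simp only [List.length_cons]; omega)]
          congr 1
          simp only [List.length_cons]; omega
        simp only [natP]
        rw [e1, e2]
        simp
  rw [List.filter_map, h2]
  rfl

theorem natBounds_decomp (p : String × String) (w rest : List (String × String))
    (hw : ∀ q ∈ w, q.1 = p.1)
    (hr : ∀ q, rest.head? = some q → (q.1 = p.1) → False) :
    natBounds ((p :: w) ++ rest)
      = 0 :: (natBounds rest).map (fun j => w.length + 1 + j) := by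
  unfold natBounds
  rw [natStarts_decomp p w rest hw hr]
  simp
  omega

theorem natBounds_head (xs : List (String × String)) :
    ∃ cs, natBounds xs = 0 :: cs := by
  cases xs with
  | nil => exact ⟨[], by simp [natBounds, natStarts]⟩
  | cons r rs =>
      unfold natBounds natStarts
      rw [show (r :: rs).length = rs.length + 1 from rfl, List.range_succ_eq_map,
        List.filter_cons]
      rw [if_pos (by simp [natP])]
      exact ⟨_, rfl⟩

theorem natGroup_shift (p : String × String) (w rest : List (String × String)) :
    ∀ se : Nat × Nat,
      natGroup ((p :: w) ++ rest) (Prod.map (fun j => w.length + 1 + j) (fun j => w.length + 1 + j) se)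
        = natGroup rest se := by
  intro ⟨s, e⟩
  unfold natGroup
  simp only [Prod.map]
  have e1 : ((p :: w) ++ rest).getD (w.length + 1 + s) ("", "") = rest.getD s ("", "") := by
    rw [List.getD_append_right _ _ _ _ (by simp only [List.length_cons]; omega)]
    congr 1
    simp only [List.length_cons]; omega
  have e2 : ((p :: w) ++ rest).drop (w.length + 1 + s) = rest.drop s := by
    rw [show w.length + 1 + s = (p :: w).length + s by simp]
    exact List.drop_length_add_append s
  have e3 : w.length + 1 + e - (w.length + 1 + s) = e - s := by omega
  rw [e1, e2, e3]

theorem altN_decomp (p : String × String) (w rest : List (String × String))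
    (hw : ∀ q ∈ w, q.1 = p.1)
    (hr : ∀ q, rest.head? = some q → (q.1 = p.1) → False) :
    altN ((p :: w) ++ rest) = (p.1, p.2 :: w.map Prod.snd) :: altN rest := by
  obtain ⟨cs, hcs⟩ := natBounds_head rest
  unfold altN
  rw [natBounds_decomp p w rest hw hr, hcs]
  rw [List.map_cons, List.tail_cons]
  simp only [Nat.add_zero]
  rw [List.zip_cons_cons, List.map_cons]
  congr 1
  · -- head group
    unfold natGroup
    simp only [List.drop_zero, Nat.sub_zero]
    have ht : ((p :: w) ++ rest).take (w.length + 1) = p :: w := by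
      rw [show w.length + 1 = (p :: w).length from rfl]
      exact List.take_left
    rw [ht]
    rfl
  · -- remaining groups
    have hz : (((w.length + 1) :: cs.map (fun j => w.length + 1 + j)).zip
          (cs.map (fun j => w.length + 1 + j)))
        = ((0 :: cs).zip cs).map
            (Prod.map (fun j => w.length + 1 + j) (fun j => w.length + 1 + j)) := by
      rw [← List.zip_map]
      simp
    rw [hz, List.map_map, List.tail_cons]
    apply List.map_congr_left
    intro se _
    exact natGroup_shift p w rest se

theorem A_eq_altN : ∀ (n : Nat) (xs : List (String × String)), xs.length ≤ n →
    group_mappings xs = altN xs := by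
  intro n
  induction n with
  | zero =>
      intro xs hxs
      have : xs = [] := List.eq_nil_of_length_eq_zero (by omega)
      subst this
      rw [group_mappings.eq_def]
      rfl
  | succ n ih =>
      intro xs hxs
      cases xs with
      | nil =>
          rw [group_mappings.eq_def]
          rfl
      | cons hd t =>
          obtain ⟨k, v⟩ := hd
          have hsplit : t = t.takeWhile (fun p => p.1 == k) ++ t.dropWhile (fun p => p.1 == k) :=
            (List.takeWhile_append_dropWhile).symm
          have hw : ∀ q ∈ t.takeWhile (fun p => p.1 == k), q.1 = ((k, v) : String × String).1 := by
            intro q hq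
            have h := List.mem_takeWhile_imp (p := fun p : String × String => p.1 == k) hq
            exact eq_of_beq h
          have hr : ∀ q, (t.dropWhile (fun p => p.1 == k)).head? = some q →
              (q.1 = ((k, v) : String × String).1) → False := by
            intro q hq heq
            have := List.head?_dropWhile_not (fun p : String × String => p.1 == k) t
            rw [hq] at this
            simp at this
            exact this heq
          have hlen : (t.dropWhile (fun p => p.1 == k)).length ≤ n := by
            have := List.length_dropWhile_le (fun p : String × String => p.1 == k) t
            simp at hxs
            omega
          rw [show group_mappings ((k, v) :: t)
              = (k, v :: (t.takeWhile (fun p => p.1 == k)).map Prod.snd)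
                :: group_mappings (t.dropWhile (fun p => p.1 == k)) from by
            rw [group_mappings]]
          rw [ih _ hlen]
          rw [show ((k, v) :: t)
              = ((k, v) :: t.takeWhile (fun p => p.1 == k)) ++ t.dropWhile (fun p => p.1 == k)
            from by rw [List.cons_append, ← hsplit]]
          rw [altN_decomp (k, v) _ _ hw hr]

-- ===== VERDICT (by name: the statement is the Claim_ definition above) =====
theorem group_mappings_spec : Claim_equal_group_mappings := by
  intro xs _
  unfold Spec_group_mappings
  rw [A_eq_altN xs.length xs le_rfl, alt_eq_altN]
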